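-- pv_equiv track=rewrite | github.com/petergiordano/vsmonster | src/parser.py | calculate_multimedia_counts
-- ===== SOURCE A (Python) =====
-- from typing import Dict, Any, List, Tuple
--
-- def calculate_multimedia_counts(scenes: List[Dict[str, Any]]) -> Dict[str, int]:
--     """Calculate multimedia tag counts for cost estimation."""
--     counts = {
--         "image_generation_count": 0,
--         "sfx_count": 0,
--         "music_cue_count": 0,
--         "ambient_count": 0,
--         "transition_count": 0,
--     }
--
--     for scene in scenes:
--         multimedia = scene.get("multimedia", {})
--         counts["image_generation_count"] += len(multimedia.get("image_tags", []))
--         counts["sfx_count"] += len(multimedia.get("sfx_tags", []))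
--         counts["music_cue_count"] += len(multimedia.get("music_tags", []))
--         counts["ambient_count"] += len(multimedia.get("ambient_tags", []))
--         counts["transition_count"] += len(multimedia.get("transition_tags", []))
--
--     return counts
-- ===== SOURCE B (Python) =====
-- def calculate_multimedia_counts(scenes):
--     """Calculate multimedia tag counts for cost estimation."""
--     # Aggregate every multimedia tag present into a tag-name-keyed totals dict,
--     # then project the five tags of interest into the result keys.
--     totals = {}
--     for scene in scenes:
--         for tag, items in scene.get("multimedia", {}).items():
--             totals[tag] = totals.get(tag, 0) + len(items)
--     return {
--         "image_generation_count": totals.get("image_tags", 0),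
--         "sfx_count": totals.get("sfx_tags", 0),
--         "music_cue_count": totals.get("music_tags", 0),
--         "ambient_count": totals.get("ambient_tags", 0),
--         "transition_count": totals.get("transition_tags", 0),
--     }
-- ===== Notes on version B (the rewrite author's own statement) =====
-- stated objective: alternative
-- what changed: Instead of looking up five fixed tag keys per scene and accumulating into a five-slot counter, B aggregates EVERY multimedia tag present into a tag-name-keyed totals dict in one pass and only then projects the five tags of interest into the result keys; Pre_ excludes multimedia association lists with duplicate keys, which cannot arise from a real Python dict and on which A's first-match lookup and B's items() sum are both accidental.
import Mathlib
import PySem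

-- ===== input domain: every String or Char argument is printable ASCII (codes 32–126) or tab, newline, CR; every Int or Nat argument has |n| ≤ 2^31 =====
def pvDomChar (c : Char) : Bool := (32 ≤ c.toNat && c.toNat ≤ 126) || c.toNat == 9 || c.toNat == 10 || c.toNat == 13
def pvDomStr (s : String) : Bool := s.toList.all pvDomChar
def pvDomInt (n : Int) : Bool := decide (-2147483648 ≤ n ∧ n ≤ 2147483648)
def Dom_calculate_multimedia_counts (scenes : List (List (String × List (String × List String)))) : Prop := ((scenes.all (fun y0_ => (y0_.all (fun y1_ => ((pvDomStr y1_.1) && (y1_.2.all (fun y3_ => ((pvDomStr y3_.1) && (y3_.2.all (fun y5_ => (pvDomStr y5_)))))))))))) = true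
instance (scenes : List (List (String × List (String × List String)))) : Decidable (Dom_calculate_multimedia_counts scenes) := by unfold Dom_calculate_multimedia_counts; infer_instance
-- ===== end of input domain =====

-- B aggregates every multimedia tag present into a tag-name-keyed totals dict in one pass and then
-- projects the five tags of interest, instead of A's per-scene fixed-key lookups into a five-slot
-- counter; objective: alternative (same cost, different data organisation).

-- ===== PORT A =====
def calculate_multimedia_counts (scenes : List (List (String × List (String × List String)))) : List (String × Int) :=
  let counts0 : PySem.Dict String Int :=
    ((((PySem.Dict.empty.insert "image_generation_count" 0).insert "sfx_count" 0).insert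
        "music_cue_count" 0).insert "ambient_count" 0).insert "transition_count" 0
  let final := scenes.foldl (fun counts scene =>
    let multimedia := PySem.Dict.mk ((PySem.Dict.mk scene).getD "multimedia" [])
    let counts := counts.insert "image_generation_count"
      (counts.getD "image_generation_count" 0 + PySem.List.len (multimedia.getD "image_tags" []))
    let counts := counts.insert "sfx_count"
      (counts.getD "sfx_count" 0 + PySem.List.len (multimedia.getD "sfx_tags" []))
    let counts := counts.insert "music_cue_count"
      (counts.getD "music_cue_count" 0 + PySem.List.len (multimedia.getD "music_tags" []))
    let counts := counts.insert "ambient_count"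
      (counts.getD "ambient_count" 0 + PySem.List.len (multimedia.getD "ambient_tags" []))
    let counts := counts.insert "transition_count"
      (counts.getD "transition_count" 0 + PySem.List.len (multimedia.getD "transition_tags" []))
    counts) counts0
  final.items

-- ===== PORT B =====
def calculate_multimedia_counts_alt (scenes : List (List (String × List (String × List String)))) : List (String × Int) :=
  -- totals: one pass over all multimedia items of all scenes ('for tag, items in multimedia.items()')
  let totals : PySem.Dict String Int := scenes.foldl (fun totals scene =>
    ((PySem.Dict.mk scene).getD "multimedia" []).foldl
      (fun totals p => totals.insert p.1 (totals.getD p.1 0 + PySem.List.len p.2)) totals)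
    PySem.Dict.empty
  -- final projection of the five tags of interest
  [("image_generation_count", totals.getD "image_tags" 0),
   ("sfx_count", totals.getD "sfx_tags" 0),
   ("music_cue_count", totals.getD "music_tags" 0),
   ("ambient_count", totals.getD "ambient_tags" 0),
   ("transition_count", totals.getD "transition_tags" 0)]

-- ===== PRECONDITION & SPEC =====
-- Pre_ excludes scenes whose nested (multimedia) association lists carry duplicate keys: such lists
-- cannot arise from a real Python dict, and on them A's first-match lookup and B's sum over items()
-- are both accidental readings of an ill-formed dict representation.
def Pre_calculate_multimedia_counts (scenes : List (List (String × List (String × List String)))) : Prop :=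
  ∀ scene ∈ scenes, ∀ p ∈ scene, (p.2.map Prod.fst).Nodup
instance (scenes : List (List (String × List (String × List String)))) : Decidable (Pre_calculate_multimedia_counts scenes) := by unfold Pre_calculate_multimedia_counts; infer_instance

def pvWitness_calculate_multimedia_counts : (List (List (String × List (String × List String)))) :=
  [[("multimedia", [("image_tags", ["a", "b"]), ("sfx_tags", ["c"])])],
   [("multimedia", [("music_tags", ["d"]), ("other_tags", ["e"])]), ("title", [])],
   [("note", [("x", [])])]]

def Spec_calculate_multimedia_counts (scenes : List (List (String × List (String × List String)))) (out : List (String × Int)) : Prop := out = calculate_multimedia_counts_alt scenes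
instance (scenes : List (List (String × List (String × List String)))) (out : List (String × Int)) : Decidable (Spec_calculate_multimedia_counts scenes out) := by unfold Spec_calculate_multimedia_counts; infer_instance

-- ===== CLAIM (what is proved, stated in full; the proofs are below) =====
def Claim_equal_calculate_multimedia_counts : Prop := ∀ (scenes : List (List (String × List (String × List String)))), Dom_calculate_multimedia_counts scenes → Pre_calculate_multimedia_counts scenes → Spec_calculate_multimedia_counts scenes (calculate_multimedia_counts scenes)

-- ===== LEMMAS AND PROOFS =====

-- length of scene's multimedia[tag] list, as A computes it per scene
def pvTagLen (tag : String) (scene : List (String × List (String × List String))) : Int :=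
  PySem.List.len ((PySem.Dict.mk ((PySem.Dict.mk scene).getD "multimedia" [])).getD tag [])

-- A's loop invariant: the accumulating pass adds the per-tag sums to each slot
lemma pvLoopA (scenes : List (List (String × List (String × List String))))
    (a b c d e : Int) :
    scenes.foldl (fun counts scene =>
      let multimedia := PySem.Dict.mk ((PySem.Dict.mk scene).getD "multimedia" [])
      let counts := counts.insert "image_generation_count"
        (counts.getD "image_generation_count" 0 + PySem.List.len (multimedia.getD "image_tags" []))
      let counts := counts.insert "sfx_count"
        (counts.getD "sfx_count" 0 + PySem.List.len (multimedia.getD "sfx_tags" []))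
      let counts := counts.insert "music_cue_count"
        (counts.getD "music_cue_count" 0 + PySem.List.len (multimedia.getD "music_tags" []))
      let counts := counts.insert "ambient_count"
        (counts.getD "ambient_count" 0 + PySem.List.len (multimedia.getD "ambient_tags" []))
      let counts := counts.insert "transition_count"
        (counts.getD "transition_count" 0 + PySem.List.len (multimedia.getD "transition_tags" []))
      counts)
      (PySem.Dict.mk [("image_generation_count", a), ("sfx_count", b),
        ("music_cue_count", c), ("ambient_count", d), ("transition_count", e)]) =
    PySem.Dict.mk [("image_generation_count", a + (scenes.map (pvTagLen "image_tags")).sum),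
      ("sfx_count", b + (scenes.map (pvTagLen "sfx_tags")).sum),
      ("music_cue_count", c + (scenes.map (pvTagLen "music_tags")).sum),
      ("ambient_count", d + (scenes.map (pvTagLen "ambient_tags")).sum),
      ("transition_count", e + (scenes.map (pvTagLen "transition_tags")).sum)] := by
  induction scenes generalizing a b c d e with
  | nil => simp
  | cons s rest ih =>
    rw [List.foldl_cons]
    show rest.foldl _ (PySem.Dict.mk [("image_generation_count", a + pvTagLen "image_tags" s),
      ("sfx_count", b + pvTagLen "sfx_tags" s),
      ("music_cue_count", c + pvTagLen "music_tags" s),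
      ("ambient_count", d + pvTagLen "ambient_tags" s),
      ("transition_count", e + pvTagLen "transition_tags" s)]) = _
    rw [ih]
    simp [add_assoc]

-- B's inner loop: folding the items of one multimedia list adds, per tag, the lengths of the
-- entries carrying that tag
lemma pvInnerB (md : List (String × List String)) (t : PySem.Dict String Int) (tag : String) :
    (md.foldl (fun totals p => totals.insert p.1 (totals.getD p.1 0 + PySem.List.len p.2)) t).getD
        tag 0 =
      t.getD tag 0 + ((md.filter (fun p => p.1 == tag)).map (fun p => PySem.List.len p.2)).sum := by
  induction md generalizing t with
  | nil => simp
  | cons p rest ih =>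
    rw [List.foldl_cons, ih, List.filter_cons]
    by_cases h : p.1 = tag
    · simp [h, add_assoc]
    · simp [h, PySem.Dict.getD_insert, Ne.symm h]

-- on a duplicate-free multimedia list the per-tag sum is the length A's lookup finds
lemma pvFilterLen (md : List (String × List String)) (hnd : (md.map Prod.fst).Nodup)
    (tag : String) :
    ((md.filter (fun p => p.1 == tag)).map (fun p => PySem.List.len p.2)).sum =
      PySem.List.len ((PySem.Dict.mk md).getD tag []) := by
  induction md with
  | nil => simp [PySem.List.len]
  | cons p rest ih =>
    obtain ⟨k, v⟩ := p
    simp only [List.map_cons, List.nodup_cons] at hnd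
    rw [List.filter_cons]
    by_cases h : k = tag
    · have hrest : rest.filter (fun q => q.1 == tag) = [] := by
        rw [List.filter_eq_nil_iff]
        intro q hq
        simp only [beq_iff_eq]
        intro hqt
        exact hnd.1 (h ▸ hqt ▸ List.mem_map_of_mem hq)
      subst h
      simp [hrest, PySem.Dict.getD_eq_get?_getD, PySem.Dict.get?_mk_cons]
    · simp only [beq_iff_eq, h, if_false]
      rw [ih hnd.2]
      have hg : (PySem.Dict.mk ((k, v) :: rest)).get? tag = (PySem.Dict.mk rest).get? tag := by
        rw [PySem.Dict.get?_mk_cons]; simp [h]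
      simp [PySem.Dict.getD_eq_get?_getD, hg]

-- B's outer loop: the totals dict ends up holding, per tag, the sum over scenes of that tag's length
lemma pvLoopB (scenes : List (List (String × List (String × List String))))
    (h : ∀ scene ∈ scenes, ∀ p ∈ scene, (p.2.map Prod.fst).Nodup)
    (t : PySem.Dict String Int) (tag : String) :
    (scenes.foldl (fun totals scene =>
        ((PySem.Dict.mk scene).getD "multimedia" []).foldl
          (fun totals p => totals.insert p.1 (totals.getD p.1 0 + PySem.List.len p.2)) totals)
      t).getD tag 0 =
      t.getD tag 0 + (scenes.map (pvTagLen tag)).sum := by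
  induction scenes generalizing t with
  | nil => simp
  | cons s rest ih =>
    rw [List.foldl_cons, ih (fun sc hsc => h sc (List.mem_cons_of_mem _ hsc)), pvInnerB]
    have hmd : (((PySem.Dict.mk s).getD "multimedia" []).map Prod.fst).Nodup := by
      rcases hq : (PySem.Dict.mk s).get? "multimedia" with _ | v
      · simp [PySem.Dict.getD_eq_get?_getD, hq]
      · have hmem : ("multimedia", v) ∈ (PySem.Dict.mk s).items :=
          PySem.Dict.mem_items_of_get?_eq_some _ hq
        rw [show (PySem.Dict.mk s).items = s from rfl] at hmem
        simp only [PySem.Dict.getD_eq_get?_getD, hq, Option.getD_some]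
        exact h s (List.mem_cons_self) _ hmem
    rw [pvFilterLen _ hmd]
    simp [pvTagLen, add_assoc]

-- ===== VERDICT (by name: the statement is the Claim_ definition above) =====
theorem calculate_multimedia_counts_spec : Claim_equal_calculate_multimedia_counts := by
  intro scenes _ hpre
  show calculate_multimedia_counts scenes = calculate_multimedia_counts_alt scenes
  have hB : calculate_multimedia_counts_alt scenes =
      [("image_generation_count", (scenes.map (pvTagLen "image_tags")).sum),
       ("sfx_count", (scenes.map (pvTagLen "sfx_tags")).sum),
       ("music_cue_count", (scenes.map (pvTagLen "music_tags")).sum),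
       ("ambient_count", (scenes.map (pvTagLen "ambient_tags")).sum),
       ("transition_count", (scenes.map (pvTagLen "transition_tags")).sum)] := by
    show [("image_generation_count", (scenes.foldl (fun totals scene =>
        ((PySem.Dict.mk scene).getD "multimedia" []).foldl
          (fun totals p => totals.insert p.1 (totals.getD p.1 0 + PySem.List.len p.2)) totals)
        PySem.Dict.empty).getD "image_tags" 0),
      ("sfx_count", _), ("music_cue_count", _), ("ambient_count", _), ("transition_count", _)] = _
    simp only [pvLoopB scenes hpre PySem.Dict.empty, PySem.Dict.getD_empty, zero_add]
  have hA : calculate_multimedia_counts scenes =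
      [("image_generation_count", (scenes.map (pvTagLen "image_tags")).sum),
       ("sfx_count", (scenes.map (pvTagLen "sfx_tags")).sum),
       ("music_cue_count", (scenes.map (pvTagLen "music_tags")).sum),
       ("ambient_count", (scenes.map (pvTagLen "ambient_tags")).sum),
       ("transition_count", (scenes.map (pvTagLen "transition_tags")).sum)] := by
    show (List.foldl (fun counts scene =>
        let multimedia := PySem.Dict.mk ((PySem.Dict.mk scene).getD "multimedia" [])
        let counts := counts.insert "image_generation_count"
          (counts.getD "image_generation_count" 0 + PySem.List.len (multimedia.getD "image_tags" []))
        let counts := counts.insert "sfx_count"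
          (counts.getD "sfx_count" 0 + PySem.List.len (multimedia.getD "sfx_tags" []))
        let counts := counts.insert "music_cue_count"
          (counts.getD "music_cue_count" 0 + PySem.List.len (multimedia.getD "music_tags" []))
        let counts := counts.insert "ambient_count"
          (counts.getD "ambient_count" 0 + PySem.List.len (multimedia.getD "ambient_tags" []))
        let counts := counts.insert "transition_count"
          (counts.getD "transition_count" 0 + PySem.List.len (multimedia.getD "transition_tags" []))
        counts)
        (PySem.Dict.mk [("image_generation_count", 0), ("sfx_count", 0),
          ("music_cue_count", 0), ("ambient_count", 0), ("transition_count", 0)]) scenes).items = _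
    rw [pvLoopA]
    simp
  rw [hA, hB]
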